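-- pv_equiv track=rewrite | github.com/dibyajyoti-15/Autonomous-Data-Pipeline-Analytics-Agent. | app.py | clean_sql
-- ===== SOURCE A (Python) =====
-- def clean_sql(raw_sql):
--     if not raw_sql:
--         return ""
--     cleaned = raw_sql.replace("```sql", "").replace("```", "").strip()
--     # Remove any lines that are not SQL (e.g., explanatory text before/after)
--     lines = cleaned.split('\n')
--     sql_lines = []
--     for line in lines:
--         stripped = line.strip().upper()
--         if stripped.startswith(('SELECT', 'WITH', 'INSERT', 'UPDATE', 'DELETE', 'CREATE', 'DROP', 'ALTER')) or sql_lines: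
--             sql_lines.append(line)
--     return '\n'.join(sql_lines).strip() if sql_lines else cleaned
-- ===== SOURCE B (Python) =====
-- def clean_sql(raw_sql):
--     if not raw_sql:
--         return ""
--     cleaned = raw_sql.replace("```sql", "").replace("```", "").strip()
--     rest = cleaned.split('\n')
--     while rest:
--         head = rest[0].strip().upper()
--         if (head.startswith('SELECT') or head.startswith('WITH')
--                 or head.startswith('INSERT') or head.startswith('UPDATE')
--                 or head.startswith('DELETE') or head.startswith('CREATE')
--                 or head.startswith('DROP') or head.startswith('ALTER')):
--             return '\n'.join(rest).strip()
--         rest = rest[1:]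
--     return cleaned
-- ===== Notes on version B (the rewrite author's own statement) =====
-- stated objective: simpler
-- what changed: Replaced A's flag-based accumulate-every-line loop by a drop-while loop that discards leading non-keyword lines and returns the stripped join of the remaining suffix as soon as a keyword line is reached.
import Mathlib
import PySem

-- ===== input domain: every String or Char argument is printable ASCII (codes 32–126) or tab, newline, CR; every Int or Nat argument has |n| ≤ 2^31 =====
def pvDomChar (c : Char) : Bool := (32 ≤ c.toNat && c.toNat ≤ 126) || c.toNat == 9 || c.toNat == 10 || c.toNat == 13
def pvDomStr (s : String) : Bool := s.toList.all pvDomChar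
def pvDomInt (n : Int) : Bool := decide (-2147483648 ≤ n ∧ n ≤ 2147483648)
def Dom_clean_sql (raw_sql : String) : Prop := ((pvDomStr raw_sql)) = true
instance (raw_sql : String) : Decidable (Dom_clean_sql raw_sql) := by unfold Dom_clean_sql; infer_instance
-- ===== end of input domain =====

-- B replaces A's flag-based accumulate-every-line loop by a drop-while loop that
-- discards leading non-keyword lines and returns the stripped join of the remaining
-- suffix as soon as a keyword line is found; objective: simpler.

-- ===== PORT A =====
-- the keyword tuple A tests against
def pvKeywords : List String :=
  ["SELECT", "WITH", "INSERT", "UPDATE", "DELETE", "CREATE", "DROP", "ALTER"]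

def pvIsSqlLine (line : String) : Bool :=
  pvKeywords.any (fun k => PySem.Str.startswith (PySem.Str.upper (PySem.Str.strip line)) k)

def clean_sql (raw_sql : String) : String :=
  if raw_sql = "" then ""
  else
    let cleaned := PySem.Str.strip
      (PySem.Str.replace (PySem.Str.replace raw_sql "```sql" "") "```" "")
    let lines := (PySem.Str.split? cleaned "\n").getD []  -- sep "\n" ≠ "", so split? is some
    let sql_lines := lines.foldl
      (fun acc line => if pvIsSqlLine line || acc ≠ [] then acc ++ [line] else acc) []
    if sql_lines ≠ [] then PySem.Str.strip (PySem.Str.join "\n" sql_lines) else cleaned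

-- ===== PORT B =====
-- Source B's while-loop: drop leading lines until one begins with a keyword, then return
-- the stripped join of the whole remaining suffix (none found → fall through)
def pvSkipToSql : List String → Option String
  | [] => none
  | l :: ls =>
      let head := PySem.Str.upper (PySem.Str.strip l)
      if PySem.Str.startswith head "SELECT" || PySem.Str.startswith head "WITH"
          || PySem.Str.startswith head "INSERT" || PySem.Str.startswith head "UPDATE"
          || PySem.Str.startswith head "DELETE" || PySem.Str.startswith head "CREATE"
          || PySem.Str.startswith head "DROP" || PySem.Str.startswith head "ALTER" then
        some (PySem.Str.strip (PySem.Str.join "\n" (l :: ls)))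
      else pvSkipToSql ls

def clean_sql_alt (raw_sql : String) : String :=
  if raw_sql = "" then ""
  else
    let cleaned := PySem.Str.strip
      (PySem.Str.replace (PySem.Str.replace raw_sql "```sql" "") "```" "")
    (pvSkipToSql ((PySem.Str.split? cleaned "\n").getD [])).getD cleaned

-- ===== PRECONDITION & SPEC =====
def Spec_clean_sql (raw_sql : String) (out : String) : Prop := out = clean_sql_alt raw_sql
instance (raw_sql : String) (out : String) : Decidable (Spec_clean_sql raw_sql out) := by unfold Spec_clean_sql; infer_instance

-- ===== CLAIM (what is proved, stated in full; the proofs are below) =====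
def Claim_equal_clean_sql : Prop := ∀ (raw_sql : String), Dom_clean_sql raw_sql → Spec_clean_sql raw_sql (clean_sql raw_sql)

-- ===== LEMMAS AND PROOFS =====

-- B's or-chain of startswith tests is A's keyword-tuple test
lemma orchain_eq_isSql (l : String) :
    (let head := PySem.Str.upper (PySem.Str.strip l)
     PySem.Str.startswith head "SELECT" || PySem.Str.startswith head "WITH"
       || PySem.Str.startswith head "INSERT" || PySem.Str.startswith head "UPDATE"
       || PySem.Str.startswith head "DELETE" || PySem.Str.startswith head "CREATE"
       || PySem.Str.startswith head "DROP" || PySem.Str.startswith head "ALTER")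
      = pvIsSqlLine l := by
  simp [pvIsSqlLine, pvKeywords, List.any, Bool.or_assoc]

-- once the accumulator is nonempty A's loop appends every remaining line
lemma foldl_append_all (p : String → Bool) (ls : List String) :
    ∀ acc : List String, acc ≠ [] →
      ls.foldl (fun acc line => if p line || acc ≠ [] then acc ++ [line] else acc) acc
        = acc ++ ls := by
  induction ls with
  | nil => intro acc _; simp
  | cons l ls ih =>
      intro acc h
      simp only [List.foldl_cons]
      rw [if_pos (by simp [h]), ih _ (by simp)]
      simp [List.append_assoc]

-- B's skip loop, phrased through the result of A's loop
lemma skip_eq_loop (ls : List String) :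
    pvSkipToSql ls
      = (match ls.foldl
            (fun acc line => if pvIsSqlLine line || acc ≠ [] then acc ++ [line] else acc) [] with
         | [] => none
         | r => some (PySem.Str.strip (PySem.Str.join "\n" r))) := by
  induction ls with
  | nil => simp [pvSkipToSql]
  | cons l ls ih =>
      rw [pvSkipToSql]
      simp only [orchain_eq_isSql l, List.foldl_cons, List.nil_append]
      by_cases hp : pvIsSqlLine l
      · rw [if_pos hp, if_pos (by simp [hp]),
            foldl_append_all pvIsSqlLine ls [l] (by simp)]
        simp
      · rw [if_neg hp, if_neg (by simp [hp]), ih]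

-- ===== VERDICT (by name: the statement is the Claim_ definition above) =====
theorem clean_sql_spec : Claim_equal_clean_sql := by
  intro raw_sql _
  unfold Spec_clean_sql clean_sql clean_sql_alt
  by_cases h0 : raw_sql = ""
  · simp [h0]
  · simp only [if_neg h0]
    rw [skip_eq_loop]
    cases h : (((PySem.Str.split? (PySem.Str.strip
        (PySem.Str.replace (PySem.Str.replace raw_sql "```sql" "") "```" "")) "\n").getD []).foldl
        (fun acc line => if pvIsSqlLine line || acc ≠ [] then acc ++ [line] else acc) []) with
    | nil => simp
    | cons a as => simp
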